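-- pv_equiv track=rewrite | github.com/Benrflanders/NLP_Final_Project | src/preprocess_data/emailInfo.py | get_email_body_without_metadata
-- ===== SOURCE A (Python) =====
-- def get_email_body_without_metadata(email):
--     tmp_body = ""
--     found_metadata_end = False
--
--     for line in email.splitlines():
--         if(found_metadata_end):
--             tmp_body += line
--             tmp_body += '\n'
--
--         if("X-FileName:" in line):
--             found_metadata_end = True
--
--     body = tmp_body
--     return body
-- ===== SOURCE B (Python) =====
-- def get_email_body_without_metadata(email):
--     lines = email.splitlines()
--     idx = None
--     for i, line in enumerate(lines):
--         if "X-FileName:" in line: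
--             idx = i
--             break
--     if idx is None:
--         return ""
--     return "".join(line + "\n" for line in lines[idx + 1:])
-- ===== Notes on version B (the rewrite author's own statement) =====
-- stated objective: simpler
-- what changed: Replaces A's flag-driven full-scan accumulator with search-for-the-marker-line (early break), then slice the remaining lines and join them each with a newline.
import Mathlib
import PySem

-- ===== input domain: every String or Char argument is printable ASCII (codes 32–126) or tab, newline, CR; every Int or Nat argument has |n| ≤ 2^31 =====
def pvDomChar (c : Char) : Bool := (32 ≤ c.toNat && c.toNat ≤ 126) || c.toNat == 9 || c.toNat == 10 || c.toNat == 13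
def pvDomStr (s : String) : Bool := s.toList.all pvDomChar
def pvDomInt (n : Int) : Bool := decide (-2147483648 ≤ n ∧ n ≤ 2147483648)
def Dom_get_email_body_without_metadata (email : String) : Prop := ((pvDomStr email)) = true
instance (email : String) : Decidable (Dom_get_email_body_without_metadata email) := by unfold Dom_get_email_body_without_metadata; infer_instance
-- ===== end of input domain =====

-- B replaces A's flag-driven accumulator scan by: find the marker line, slice the tail, join (simpler decomposition).

-- ===== PORT A =====
-- one step of A's loop body on state (tmp_body as chars, found_metadata_end)
def pvAStep (s : List Char × Bool) (line : String) : List Char × Bool :=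
  let tmp := if s.2 then s.1 ++ line.toList ++ ['\n'] else s.1
  let found := if PySem.Str.isIn "X-FileName:" line then true else s.2
  (tmp, found)

def get_email_body_without_metadata (email : String) : String :=
  let st := (PySem.Str.splitlines email).foldl pvAStep ([], false)
  String.ofList st.1

-- ===== PORT B =====
-- Source B's enumerate-and-break search loop, transcribed as structural recursion carrying the index
def pvFindMarker : List String → Nat → Option Nat
  | [], _ => none
  | l :: ls, i => if PySem.Str.isIn "X-FileName:" l then some i else pvFindMarker ls (i + 1)

def get_email_body_without_metadata_alt (email : String) : String :=
  let lines := PySem.Str.splitlines email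
  match pvFindMarker lines 0 with
  | none => ""
  | some i => String.ofList (((lines.drop (i + 1)).map (fun l => l.toList ++ ['\n'])).flatten)

-- ===== PRECONDITION & SPEC =====
def Spec_get_email_body_without_metadata (email : String) (out : String) : Prop := out = get_email_body_without_metadata_alt email
instance (email : String) (out : String) : Decidable (Spec_get_email_body_without_metadata email out) := by unfold Spec_get_email_body_without_metadata; infer_instance

-- ===== CLAIM (what is proved, stated in full; the proofs are below) =====
def Claim_equal_get_email_body_without_metadata : Prop := ∀ (email : String), Dom_get_email_body_without_metadata email → Spec_get_email_body_without_metadata email (get_email_body_without_metadata email)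

-- ===== LEMMAS AND PROOFS =====
-- after the flag is set, A appends every remaining line plus '\n'
theorem pvFoldTrue (ls : List String) (acc : List Char) :
    ls.foldl pvAStep (acc, true) = (acc ++ (ls.map (fun l => l.toList ++ ['\n'])).flatten, true) := by
  induction ls generalizing acc with
  | nil => simp
  | cons l ls ih =>
      simp [List.foldl, pvAStep, ih]

theorem pvFindShift (ls : List String) (j : Nat) :
    pvFindMarker ls (j + 1) = (pvFindMarker ls j).map (· + 1) := by
  induction ls generalizing j with
  | nil => simp [pvFindMarker]
  | cons l ls ih =>
      simp only [pvFindMarker]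
      split
      · simp
      · exact ih (j + 1)

-- before the flag is set, A behaves as: search for the marker, then append the tail
theorem pvFoldFalse (ls : List String) (acc : List Char) :
    ls.foldl pvAStep (acc, false) =
      match pvFindMarker ls 0 with
      | none => (acc, false)
      | some i => (acc ++ ((ls.drop (i + 1)).map (fun l => l.toList ++ ['\n'])).flatten, true) := by
  induction ls generalizing acc with
  | nil => simp [pvFindMarker]
  | cons l ls ih =>
      by_cases h : PySem.Str.isIn "X-FileName:" l
      · simp only [pvFindMarker, h, if_pos, List.foldl, pvAStep, Bool.false_eq_true, if_false]
        simpa using pvFoldTrue ls acc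
      · simp only [pvFindMarker, h, List.foldl, pvAStep, Bool.false_eq_true, if_false]
        rw [ih, pvFindShift]
        cases pvFindMarker ls 0 <;> simp

-- ===== VERDICT (by name: the statement is the Claim_ definition above) =====
theorem get_email_body_without_metadata_spec : Claim_equal_get_email_body_without_metadata := by
  intro email _
  unfold Spec_get_email_body_without_metadata get_email_body_without_metadata
    get_email_body_without_metadata_alt
  rw [pvFoldFalse]
  cases h : pvFindMarker (PySem.Str.splitlines email) 0 <;> simp [h]
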